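-- pv_equiv track=rewrite | github.com/Alexzander19/CowAndBull | PYTHON/1-rstHome/main.py | find_best_manager
-- ===== SOURCE A (Python) =====
-- def find_best_manager(manager: list):
--     max_sales: int = 0
--     who_is_the_best: list = []
--
--     for one in manager:
--         if one['sales'] == max_sales:
--             who_is_the_best.append(one['id'])
--
--         elif one['sales'] > max_sales:
--             who_is_the_best.clear()
--             who_is_the_best.append(one['id'])
--             max_sales = one['sales']
--
--     return [max_sales, who_is_the_best]
-- ===== SOURCE B (Python) =====
-- def find_best_manager(manager: list):
--     m = 0
--     for one in manager:
--         if one['sales'] > m: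
--             m = one['sales']
--     return [m, [one['id'] for one in manager if one['sales'] == m]]
-- ===== Notes on version B (the rewrite author's own statement) =====
-- stated objective: simpler
-- what changed: Replaces the single-pass running-best with clear-and-rebuild of the tie list by a two-pass compute-max-then-filter: first raise m (seeded at 0) over the sales, then collect ids whose sales equal m in input order.
import Mathlib
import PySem

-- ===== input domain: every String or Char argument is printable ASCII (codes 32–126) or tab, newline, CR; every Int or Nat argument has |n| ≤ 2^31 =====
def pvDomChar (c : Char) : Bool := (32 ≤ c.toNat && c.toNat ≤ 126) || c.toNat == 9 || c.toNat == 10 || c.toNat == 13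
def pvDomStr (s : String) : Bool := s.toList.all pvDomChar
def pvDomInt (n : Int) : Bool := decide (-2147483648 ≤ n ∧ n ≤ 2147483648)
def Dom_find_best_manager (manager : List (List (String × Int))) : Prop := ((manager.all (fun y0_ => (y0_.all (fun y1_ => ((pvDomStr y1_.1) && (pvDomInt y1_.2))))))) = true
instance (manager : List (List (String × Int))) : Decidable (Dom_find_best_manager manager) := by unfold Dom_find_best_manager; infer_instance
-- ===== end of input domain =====

-- B: two-pass compute-max-then-filter instead of A's single-pass running-best with clear-and-rebuild tie list; objective: simpler.


-- dict[str,int] lookup (first match, per the assoc-list convention); exact wherever the key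
-- is present — Pre_ guarantees that, so the `.getD 0` default is never reached inside Pre_.
def pyDictGet (d : List (String × Int)) (k : String) : Int :=
  ((d.find? (fun p => p.1 == k)).map (·.2)).getD 0

-- ===== PORT A =====
def find_best_manager (manager : List (List (String × Int))) : Int × List Int :=
  let st := manager.foldl (fun (st : Int × List Int) one =>
    if pyDictGet one "sales" = st.1 then (st.1, st.2 ++ [pyDictGet one "id"])
    else if pyDictGet one "sales" > st.1 then (pyDictGet one "sales", [pyDictGet one "id"])
    else st) (0, [])
  (st.1, st.2)

-- ===== PORT B =====
def find_best_manager_alt (manager : List (List (String × Int))) : Int × List Int :=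
  let m := manager.foldl (fun m one => if pyDictGet one "sales" > m then pyDictGet one "sales" else m) 0
  (m, (manager.filter (fun one => pyDictGet one "sales" = m)).map (fun one => pyDictGet one "id"))

-- ===== PRECONDITION & SPEC =====
def pvSales (one : List (String × Int)) : Int := pyDictGet one "sales"

-- Pre_ excludes exactly the inputs where Python A raises KeyError: an entry missing key 'sales',
-- or an entry missing key 'id' whose sales reach the clamped maximum of all earlier sales
-- (only there does A read one['id']).
def Pre_find_best_manager (manager : List (List (String × Int))) : Prop :=
  ∀ i, (h : i < manager.length) →
    (manager[i].find? (fun p => p.1 == "sales")).isSome ∧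
    (((manager.take i).map pvSales).foldl max 0 ≤ pvSales manager[i] →
      (manager[i].find? (fun p => p.1 == "id")).isSome)
instance (manager : List (List (String × Int))) : Decidable (Pre_find_best_manager manager) := by unfold Pre_find_best_manager; infer_instance
def pvWitness_find_best_manager : (List (List (String × Int))) := [[("sales", 3), ("id", 1)], [("sales", 3), ("id", 2)]]
def Spec_find_best_manager (manager : List (List (String × Int))) (out : Int × List Int) : Prop := out = find_best_manager_alt manager
instance (manager : List (List (String × Int))) (out : Int × List Int) : Decidable (Spec_find_best_manager manager out) := by unfold Spec_find_best_manager; infer_instance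

-- ===== CLAIM (what is proved, stated in full; the proofs are below) =====
def Claim_equal_find_best_manager : Prop := ∀ (manager : List (List (String × Int))), Dom_find_best_manager manager → Pre_find_best_manager manager → Spec_find_best_manager manager (find_best_manager manager)

-- ===== LEMMAS AND PROOFS =====

def pvMaxF (m : Int) (xs : List (List (String × Int))) : Int :=
  xs.foldl (fun m one => if pvSales one > m then pvSales one else m) m

def pvStep (st : Int × List Int) (one : List (String × Int)) : Int × List Int :=
  if pvSales one = st.1 then (st.1, st.2 ++ [pyDictGet one "id"])
  else if pvSales one > st.1 then (pvSales one, [pyDictGet one "id"])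
  else st

lemma pvMaxF_ge (xs : List (List (String × Int))) : ∀ m : Int, m ≤ pvMaxF m xs := by
  induction xs with
  | nil => intro m; simp [pvMaxF]
  | cons x xs ih =>
    intro m
    simp only [pvMaxF, List.foldl_cons]
    by_cases h : pvSales x > m
    · simp only [h, if_pos]
      exact le_of_lt (lt_of_lt_of_le h (ih (pvSales x)))
    · simp only [h]
      exact ih m

lemma pvFold_char (xs : List (List (String × Int))) :
    ∀ (m : Int) (l : List Int),
    xs.foldl pvStep (m, l) =
      (pvMaxF m xs,
       (if pvMaxF m xs = m then l else []) ++
         (xs.filter (fun o => pvSales o = pvMaxF m xs)).map (fun o => pyDictGet o "id")) := by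
  induction xs with
  | nil => intro m l; simp [pvMaxF]
  | cons x xs ih =>
    intro m l
    simp only [List.foldl_cons]
    rcases lt_trichotomy (pvSales x) m with h | h | h
    · -- s < m : skip
      have hstep : pvStep (m, l) x = (m, l) := by
        simp [pvStep, ne_of_lt h, not_lt.mpr (le_of_lt h)]
      rw [hstep, ih]
      have hmx : pvMaxF m (x :: xs) = pvMaxF m xs := by
        simp [pvMaxF, not_lt.mpr (le_of_lt h)]
      rw [hmx]
      have hx : ¬ (pvSales x = pvMaxF m xs) := by
        have := pvMaxF_ge xs m
        omega
      simp [hx]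
    · -- s = m : append
      have hstep : pvStep (m, l) x = (m, l ++ [pyDictGet x "id"]) := by
        simp [pvStep, h]
      rw [hstep, ih]
      have hmx : pvMaxF m (x :: xs) = pvMaxF m xs := by
        simp [pvMaxF, h]
      rw [hmx]
      by_cases hM : pvMaxF m xs = m
      · have hx : pvSales x = pvMaxF m xs := by omega
        simp [hx, hM]
      · have hx : ¬ (pvSales x = pvMaxF m xs) := by
          have := pvMaxF_ge xs m
          omega
        simp [hx, hM]
    · -- s > m : clear and restart
      have hstep : pvStep (m, l) x = (pvSales x, [pyDictGet x "id"]) := by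
        have hne : ¬ (pvSales x = m) := by omega
        simp [pvStep, hne, h]
      rw [hstep, ih]
      have hmx : pvMaxF m (x :: xs) = pvMaxF (pvSales x) xs := by
        simp [pvMaxF, h]
      rw [hmx]
      have hMge : pvSales x ≤ pvMaxF (pvSales x) xs := pvMaxF_ge xs (pvSales x)
      have hMne : ¬ (pvMaxF (pvSales x) xs = m) := by omega
      by_cases hx : pvSales x = pvMaxF (pvSales x) xs
      · rw [List.filter_cons_of_pos (by simpa using hx)]
        simp [hx.symm]
        exact fun hc => absurd hc.symm (ne_of_lt h)
      · have hx' : ¬ (pvMaxF (pvSales x) xs = pvSales x) := fun hc => hx hc.symm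
        simp [hx, hMne, hx']

-- ===== VERDICT (by name: the statement is the Claim_ definition above) =====
theorem find_best_manager_spec : Claim_equal_find_best_manager := by
  intro manager _ _
  unfold Spec_find_best_manager find_best_manager find_best_manager_alt
  have h := pvFold_char manager 0 []
  simp only [ite_self, List.nil_append] at h
  simpa [pvStep, pvSales, pvMaxF] using h
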